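-- pv_equiv track=rewrite | github.com/AlexandruTataru/CodeCup2023 | scripts/algorithm_visualizer.py | get_score_on_line
-- ===== SOURCE A (Python) =====
-- def get_score_on_line(game_line):
--     score = 0
--     for s in range(0, 6):
--         for e in range(s + 2, 8):
--             if 0 in game_line[s:e]:
--                 continue
--             lr = game_line[s:e]
--             rl = game_line[s:e]
--             rl.reverse()
--             if lr == rl:
--                 score = score + (e - s)
--     return score
-- ===== SOURCE B (Python) =====
-- def _is_pal(game_line, s, e):
--     # is game_line[s:e] a palindrome?  two pointers moving inward, no copying
--     return s + 1 >= e or (game_line[s] == game_line[e - 1] and _is_pal(game_line, s + 1, e - 1))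
--
--
-- def get_score_on_line(game_line):
--     n = len(game_line)
--     # prefix counts of zeros over the scored window (the first 7 cells):
--     # game_line[a:b] is zero-free iff z[b] == z[a]
--     z = [0]
--     for v in game_line[:7]:
--         z.append(z[-1] + (1 if v == 0 else 0))
--     score = 0
--     for s in range(6):
--         for e in range(s + 2, 8):
--             a, b = min(s, n), min(e, n)  # game_line[s:e] is the segment [a, b)
--             if z[b] == z[a] and _is_pal(game_line, a, b):
--                 score += e - s
--     return score
-- ===== Notes on version B (the rewrite author's own statement) =====
-- stated objective: alternative
-- what changed: Replaces A's per-window slice copy + in-place reverse + '0 in' membership scan by a prefix zero-count list built once (O(1) zero-free test per window, the inner membership scan disappears), an allocation-free two-pointer palindrome recursion over indices, and explicit clamping of the window bounds instead of relying on slice copies.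
import Mathlib
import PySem

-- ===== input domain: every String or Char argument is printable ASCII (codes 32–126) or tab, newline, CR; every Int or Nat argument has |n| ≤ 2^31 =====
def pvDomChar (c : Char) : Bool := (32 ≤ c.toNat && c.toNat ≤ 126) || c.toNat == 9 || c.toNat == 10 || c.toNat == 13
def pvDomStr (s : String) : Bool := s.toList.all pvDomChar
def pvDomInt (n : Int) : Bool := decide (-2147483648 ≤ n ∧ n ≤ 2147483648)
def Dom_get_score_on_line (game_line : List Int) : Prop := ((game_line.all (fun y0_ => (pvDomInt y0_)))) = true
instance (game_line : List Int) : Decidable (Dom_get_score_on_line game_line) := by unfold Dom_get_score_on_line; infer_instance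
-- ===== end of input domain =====

set_option maxHeartbeats 1000000

-- B replaces A's slice-copy / in-place-reverse / '0 in' scans by a prefix zero-count list
-- built once, a two-pointer palindrome recursion over indices, and explicit clamping of the
-- window bounds.  No argument is mutated.

-- ===== PORT A =====
def get_score_on_line (game_line : List Int) : Int :=
  (PySem.List.pyRange 0 6 1).foldl (fun score s =>
    (PySem.List.pyRange (s + 2) 8 1).foldl (fun score e =>
      if (0 : Int) ∈ PySem.List.slice game_line (some s) (some e) then score
      else
        -- lr = game_line[s:e]; rl is the same fresh copy reversed in place
        if PySem.List.slice game_line (some s) (some e)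
            = (PySem.List.slice game_line (some s) (some e)).reverse then
          score + (e - s)
        else score) score) 0

-- ===== PORT B =====
-- Source B's _is_pal: two-pointer palindrome test of game_line[s:e]; every call keeps s and
-- e-1 inside the list, so List.getD is exact for Python's game_line[s] / game_line[e - 1]
def pv_is_pal (game_line : List Int) (s e : Nat) : Bool :=
  if s + 1 ≥ e then true
  else (game_line.getD s 0 == game_line.getD (e - 1) 0) && pv_is_pal game_line (s + 1) (e - 1)
termination_by e - s

def get_score_on_line_alt (game_line : List Int) : Int :=
  let n : Int := (game_line.length : Int)
  -- z = prefix counts of zeros over the first 7 cells (running last entry, appended one by one)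
  let z := ((game_line.take 7).foldl
    (fun (p : List Int × Int) v =>
      let acc := p.2 + (if v = 0 then 1 else 0)
      (p.1 ++ [acc], acc)) ([(0 : Int)], (0 : Int))).1
  (PySem.List.pyRange 0 6 1).foldl (fun score s =>
    (PySem.List.pyRange (s + 2) 8 1).foldl (fun score e =>
      let a : Int := min s n
      let b : Int := min e n
      -- 0 ≤ a ≤ b ≤ n and b ≤ 7, so z[b], z[a] are in range and List.getD is exact
      if z.getD b.toNat 0 = z.getD a.toNat 0 ∧ pv_is_pal game_line a.toNat b.toNat = true then
        score + (e - s)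
      else score) score) 0

-- ===== PRECONDITION & SPEC =====
def Spec_get_score_on_line (game_line : List Int) (out : Int) : Prop := out = get_score_on_line_alt game_line
instance (game_line : List Int) (out : Int) : Decidable (Spec_get_score_on_line game_line out) := by unfold Spec_get_score_on_line; infer_instance

-- ===== CLAIM (what is proved, stated in full; the proofs are below) =====
def Claim_equal_get_score_on_line : Prop := ∀ (game_line : List Int), Dom_get_score_on_line game_line → Spec_get_score_on_line game_line (get_score_on_line game_line)

-- ===== LEMMAS AND PROOFS =====

-- zero count as Int
def pvZ (l : List Int) : Int := (l.countP (fun v => decide (v = 0)) : Int)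

-- B's z-list as a named term (proof helper; definitionally the port's z)
def pvZL (xs : List Int) (w : Nat) : List Int :=
  ((xs.take w).foldl
    (fun (p : List Int × Int) v =>
      (p.1 ++ [p.2 + (if v = 0 then 1 else 0)], p.2 + (if v = 0 then 1 else 0)))
    ([(0:Int)], (0:Int))).1

-- B's z-fold, fully characterised
theorem pv_zfold (l : List Int) : ∀ (zs : List Int) (a : Int),
    l.foldl (fun (p : List Int × Int) v =>
      ((p.1 ++ [p.2 + (if v = 0 then 1 else 0)], p.2 + (if v = 0 then 1 else 0)) : List Int × Int))
      (zs, a)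
    = (zs ++ (List.range l.length).map (fun i => a + pvZ (l.take (i + 1))), a + pvZ l) := by
  induction l with
  | nil => intro zs a; simp [pvZ]
  | cons v l ih =>
    intro zs a
    simp only [List.foldl_cons]
    rw [ih]
    refine Prod.ext ?_ ?_
    · show zs ++ [a + _] ++ _ = zs ++ _
      simp only [List.length_cons, List.range_succ_eq_map, List.map_cons, List.map_map]
      simp only [List.append_assoc, List.singleton_append]
      congr 1
      simp [pvZ, List.countP_cons]
      intro i _
      split_ifs <;> ring
    · show (a + _) + pvZ l = a + pvZ (v :: l)
      simp [pvZ, List.countP_cons]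
      split_ifs <;> ring

-- entry i of the z-list is the zero count of the first i window cells
theorem pv_zget (l : List Int) (i : Nat) (hi : i ≤ l.length) :
    (([(0:Int)] ++ (List.range l.length).map (fun i => 0 + pvZ (l.take (i + 1)))).getD i 0)
      = pvZ (l.take i) := by
  cases i with
  | zero => simp [pvZ]
  | succ j =>
    have hj : j < l.length := by omega
    rw [List.getD_eq_getElem?_getD]
    simp [hj]

theorem pv_zcond (l : List Int) (s e : Nat) (hse : s ≤ e) (he : e ≤ l.length) :
    (pvZ (l.take e) = pvZ (l.take s)) ↔ (0 : Int) ∉ (l.drop s).take (e - s) := by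
  have h1 : l.take e = l.take s ++ (l.drop s).take (e - s) := by
    rw [← List.take_add]; congr 1; omega
  rw [h1]
  unfold pvZ
  rw [List.countP_append]
  push_cast
  have h2 : (0:Int) ≤ (((l.drop s).take (e - s)).countP (fun v => decide (v = 0)) : Int) := by positivity
  constructor
  · intro h
    have : (((l.drop s).take (e - s)).countP (fun v => decide (v = 0))) = 0 := by omega
    rw [List.countP_eq_zero] at this
    intro hmem
    simpa using this 0 hmem
  · intro h
    have : (((l.drop s).take (e - s)).countP (fun v => decide (v = 0))) = 0 := by
      rw [List.countP_eq_zero]; intro a ha; simp; rintro rfl; exact h ha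
    omega

-- getD of the z-list
theorem pv_zl_getD (xs : List Int) (i : Nat) (hi : i ≤ 7) (hn : i ≤ xs.length) :
    (pvZL xs 7).getD i 0 = pvZ (xs.take i) := by
  unfold pvZL
  rw [pv_zfold]
  have h1 : i ≤ (xs.take 7).length := by simp; omega
  rw [pv_zget (xs.take 7) i h1]
  rw [List.take_take, min_eq_left hi]

-- peel a palindrome at both ends
theorem pv_peel (a b : Int) (m : List Int) :
    (a :: (m ++ [b]) = (a :: (m ++ [b])).reverse) ↔ (a = b ∧ m = m.reverse) := by
  rw [List.reverse_cons, List.reverse_append, List.reverse_singleton]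
  constructor
  · intro h
    have hh : a = b := by
      have := congrArg (fun l => l.headD 0) h
      simpa using this
    subst hh
    refine ⟨rfl, ?_⟩
    have := h
    rw [List.singleton_append] at this
    have h2 : m ++ [a] = m.reverse ++ [a] := by
      exact List.cons_injective this
    exact List.append_left_injective [a] h2
  · rintro ⟨rfl, hm⟩
    rw [List.singleton_append, ← hm]
    simp

-- segment decomposition for the inductive step
theorem pv_seg_decomp (xs : List Int) (s e : Nat) (h1 : s + 1 < e) (h2 : e ≤ xs.length) :
    (xs.drop s).take (e - s)
      = xs.getD s 0 :: ((xs.drop (s+1)).take (e - 1 - (s+1)) ++ [xs.getD (e-1) 0]) := by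
  have hs : s < xs.length := by omega
  have he1 : e - 1 < xs.length := by omega
  rw [List.drop_eq_getElem_cons hs]
  have h3 : e - s = (e - s - 1) + 1 := by omega
  rw [h3]
  rw [List.take_succ_cons]
  congr 1
  · simp [List.getD_eq_getElem?_getD, hs]
  have h4 : e - s - 1 = (e - 1 - (s+1)) + 1 := by omega
  rw [h4, List.take_add_one]
  congr 1
  rw [List.getElem?_drop]
  have h5 : s + 1 + (e - 1 - (s + 1)) = e - 1 := by omega
  rw [h5]
  simp [List.getElem?_eq_getElem he1, List.getD_eq_getElem?_getD]

-- pv_is_pal computes exactly "the segment equals its reversal"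
theorem pv_pal_iff (n : Nat) : ∀ (xs : List Int) (s e : Nat), e - s ≤ n → e ≤ xs.length →
    (pv_is_pal xs s e = true ↔ (xs.drop s).take (e - s) = ((xs.drop s).take (e - s)).reverse) := by
  induction n with
  | zero =>
    intro xs s e hn _
    have : e - s = 0 := by omega
    rw [pv_is_pal]
    simp [this, if_pos (by omega : s + 1 ≥ e)]
  | succ n ih =>
    intro xs s e hn he
    rw [pv_is_pal]
    by_cases hse : s + 1 ≥ e
    · have : (xs.drop s).take (e - s) = ((xs.drop s).take (e - s)).reverse := by
        rcases Nat.lt_or_ge s xs.length with hs | hs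
        · rcases Nat.lt_or_ge s e with h | h
          · have : e - s = 1 := by omega
            rw [this, List.drop_eq_getElem_cons hs, List.take_succ_cons, List.take_zero]
            rfl
          · simp [Nat.sub_eq_zero_of_le h]
        · rw [List.drop_eq_nil_of_le (by omega)]; simp
      rw [if_pos hse]
      exact ⟨fun _ => this, fun _ => rfl⟩
    · push Not at hse
      rw [if_neg (by omega)]
      rw [pv_seg_decomp xs s e hse he, pv_peel]
      rw [Bool.and_eq_true, beq_iff_eq]
      rw [ih xs (s+1) (e-1) (by omega) (by omega)]

-- Python's slice game_line[s:e] is the clamped index segment [min s n, min e n)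
theorem pv_slice_seg (xs : List Int) (s e : Int) (h0 : 0 ≤ s) (hse : s ≤ e) :
    PySem.List.slice xs (some s) (some e)
      = (xs.drop (min s.toNat xs.length)).take (min e.toNat xs.length - min s.toNat xs.length) := by
  rw [PySem.List.slice_toNat xs h0 (by omega)]
  have hd : xs.drop s.toNat = xs.drop (min s.toNat xs.length) := by
    rcases le_total s.toNat xs.length with h | h
    · rw [min_eq_left h]
    · rw [min_eq_right h, List.drop_length, List.drop_eq_nil_of_le h]
  rw [hd, List.take_eq_take_iff]
  simp only [List.length_drop]
  omega

-- B's loop condition at (s, e) is exactly A's slice condition at (s, e)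
theorem pv_cond_iff (xs : List Int) (s e : Int) (h0 : 0 ≤ s) (hse : s ≤ e) (he7 : e ≤ 7) :
    ((pvZL xs 7).getD (min e.toNat xs.length) 0 = (pvZL xs 7).getD (min s.toNat xs.length) 0 ∧
        pv_is_pal xs (min s.toNat xs.length) (min e.toNat xs.length) = true)
    ↔ ((0:Int) ∉ PySem.List.slice xs (some s) (some e) ∧
        PySem.List.slice xs (some s) (some e)
          = (PySem.List.slice xs (some s) (some e)).reverse) := by
  have hab : min s.toNat xs.length ≤ min e.toNat xs.length := by
    have : s.toNat ≤ e.toNat := by omega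
    omega
  have hb7 : min e.toNat xs.length ≤ 7 := by
    have : e.toNat ≤ 7 := by omega
    omega
  have hbn : min e.toNat xs.length ≤ xs.length := by omega
  rw [pv_slice_seg xs s e h0 hse]
  rw [pv_zl_getD xs _ hb7 hbn, pv_zl_getD xs _ (by omega) (by omega)]
  rw [pv_zcond xs _ _ hab hbn]
  rw [pv_pal_iff (min e.toNat xs.length - min s.toNat xs.length) xs _ _ le_rfl hbn]

-- pointwise-equal loop bodies give equal folds
theorem pv_foldl_congr {α β : Type} (l : List α) (f g : β → α → β) (b : β)
    (h : ∀ x ∈ l, ∀ acc, f acc x = g acc x) : l.foldl f b = l.foldl g b := by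
  induction l generalizing b with
  | nil => rfl
  | cons x t ih =>
    simp only [List.foldl_cons]
    rw [h x (by simp)]
    exact ih _ (fun y hy acc => h y (List.mem_cons_of_mem x hy) acc)

-- ===== VERDICT =====
theorem get_score_on_line_spec : Claim_equal_get_score_on_line := by
  unfold Claim_equal_get_score_on_line Spec_get_score_on_line
  intro xs _
  unfold get_score_on_line get_score_on_line_alt
  have hz : ((xs.take 7).foldl
      (fun (p : List Int × Int) v =>
        (p.1 ++ [p.2 + (if v = 0 then 1 else 0)], p.2 + (if v = 0 then 1 else 0)))
      ([(0:Int)], (0:Int))).1 = pvZL xs 7 := rfl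
  refine pv_foldl_congr _ _ _ _ ?_
  intro s hs score
  rw [PySem.List.mem_pyRange_one] at hs
  refine pv_foldl_congr _ _ _ _ ?_
  intro e he acc
  rw [PySem.List.mem_pyRange_one] at he
  have h0 : (0:Int) ≤ s := hs.1
  have hse : s ≤ e := by omega
  have he7 : e ≤ 7 := by omega
  have hmin_a : (min s (xs.length : Int)).toNat = min s.toNat xs.length := by omega
  have hmin_b : (min e (xs.length : Int)).toNat = min e.toNat xs.length := by omega
  have hiff := pv_cond_iff xs s e h0 hse he7
  simp only [hz, hmin_a, hmin_b]
  by_cases hm : (0:Int) ∈ PySem.List.slice xs (some s) (some e)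
  · have hB : ¬ ((pvZL xs 7).getD (min e.toNat xs.length) 0
          = (pvZL xs 7).getD (min s.toNat xs.length) 0 ∧
        pv_is_pal xs (min s.toNat xs.length) (min e.toNat xs.length) = true) := by
      rw [hiff]; tauto
    rw [if_pos hm, if_neg hB]
  · by_cases hp : PySem.List.slice xs (some s) (some e)
        = (PySem.List.slice xs (some s) (some e)).reverse
    · have hB : ((pvZL xs 7).getD (min e.toNat xs.length) 0
            = (pvZL xs 7).getD (min s.toNat xs.length) 0 ∧
          pv_is_pal xs (min s.toNat xs.length) (min e.toNat xs.length) = true) := by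
        rw [hiff]; exact ⟨hm, hp⟩
      rw [if_neg hm, if_pos hp, if_pos hB]
    · have hB : ¬ ((pvZL xs 7).getD (min e.toNat xs.length) 0
            = (pvZL xs 7).getD (min s.toNat xs.length) 0 ∧
          pv_is_pal xs (min s.toNat xs.length) (min e.toNat xs.length) = true) := by
        rw [hiff]; tauto
      rw [if_neg hm, if_neg hp, if_neg hB]
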